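-- pv_equiv track=rewrite | github.com/ivanitsviktor/kat | 8_Twice as old.py | twice_as_old
-- ===== SOURCE A (Python) =====
-- def twice_as_old(dad_years_old, son_years_old):
--     i=0
--     while dad_years_old-son_years_old!=i:
--         i+=1
--     if (son_years_old-i)<0:
--         return i-son_years_old
--     else:
--         return son_years_old-i
-- ===== SOURCE B (Python) =====
-- def twice_as_old(dad_years_old, son_years_old):
--     return abs(2 * son_years_old - dad_years_old)
-- ===== Notes on version B (the rewrite author's own statement) =====
-- stated objective: faster
-- what changed: Replaced the O(dad-son) counting loop (and the sign-split absolute value) by the closed-form abs(2*son - dad).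
import Mathlib
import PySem

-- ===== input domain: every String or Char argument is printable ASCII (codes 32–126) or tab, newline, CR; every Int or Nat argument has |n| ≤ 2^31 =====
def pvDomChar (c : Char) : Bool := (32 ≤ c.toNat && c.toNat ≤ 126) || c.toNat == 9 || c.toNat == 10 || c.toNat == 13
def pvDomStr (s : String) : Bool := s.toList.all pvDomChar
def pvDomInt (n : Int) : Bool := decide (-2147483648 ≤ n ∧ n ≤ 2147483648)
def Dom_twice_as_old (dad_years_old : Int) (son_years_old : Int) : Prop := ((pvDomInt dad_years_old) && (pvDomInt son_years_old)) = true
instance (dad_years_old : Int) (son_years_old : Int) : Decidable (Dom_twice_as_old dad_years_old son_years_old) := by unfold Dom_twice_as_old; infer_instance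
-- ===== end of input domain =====

-- B replaces A's O(dad-son) counting loop by the closed form |2*son - dad| (faster, asymptotic).
-- A diverges when dad_years_old < son_years_old; Pre_ excludes those inputs.

-- ===== PORT A =====
-- the while loop: i counts up until dad - son = i; fuel only makes the same computation total
def twiceLoopA (diff : Int) (i : Int) : Nat → Int
  | 0 => i
  | n + 1 => if diff - i ≠ 0 then twiceLoopA diff (i + 1) n else i

def twice_as_old (dad_years_old : Int) (son_years_old : Int) : Int :=
  let i := twiceLoopA (dad_years_old - son_years_old) 0 (dad_years_old - son_years_old).toNat
  if son_years_old - i < 0 then i - son_years_old else son_years_old - i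

-- ===== PORT B =====
def twice_as_old_alt (dad_years_old : Int) (son_years_old : Int) : Int :=
  |2 * son_years_old - dad_years_old|

-- ===== PRECONDITION & SPEC =====
-- A's while loop never terminates when dad < son (i only increases), so those inputs are excluded.
def Pre_twice_as_old (dad_years_old : Int) (son_years_old : Int) : Prop :=
  son_years_old ≤ dad_years_old
instance (dad_years_old : Int) (son_years_old : Int) : Decidable (Pre_twice_as_old dad_years_old son_years_old) := by unfold Pre_twice_as_old; infer_instance
def pvWitness_twice_as_old : Int × Int := (36, 7)

def Spec_twice_as_old (dad_years_old : Int) (son_years_old : Int) (out : Int) : Prop := out = twice_as_old_alt dad_years_old son_years_old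
instance (dad_years_old : Int) (son_years_old : Int) (out : Int) : Decidable (Spec_twice_as_old dad_years_old son_years_old out) := by unfold Spec_twice_as_old; infer_instance

-- ===== CLAIM (what is proved, stated in full; the proofs are below) =====
def Claim_equal_twice_as_old : Prop := ∀ (dad_years_old : Int) (son_years_old : Int), Dom_twice_as_old dad_years_old son_years_old → Pre_twice_as_old dad_years_old son_years_old → Spec_twice_as_old dad_years_old son_years_old (twice_as_old dad_years_old son_years_old)

-- ===== LEMMAS AND PROOFS =====
theorem twiceLoopA_eq (n : Nat) : ∀ (i : Int), twiceLoopA (i + n) i n = i + n := by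
  induction n with
  | zero => intro i; simp [twiceLoopA]
  | succ m ih =>
      intro i
      have h : (i : Int) + (m + 1 : Nat) - i ≠ 0 := by push_cast; omega
      have hstep := ih (i + 1)
      rw [show (i : Int) + 1 + (m : Nat) = i + ((m + 1 : Nat) : Int) by push_cast; ring] at hstep
      rw [twiceLoopA, if_pos h]
      exact hstep

-- ===== VERDICT (by name: the statement is the Claim_ definition above) =====
theorem twice_as_old_spec : Claim_equal_twice_as_old := by
  intro d s _ hpre
  unfold Pre_twice_as_old at hpre
  unfold Spec_twice_as_old twice_as_old twice_as_old_alt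
  dsimp only
  have hd : (0:Int) ≤ d - s := by omega
  have hcast : ((d - s).toNat : Int) = d - s := Int.toNat_of_nonneg hd
  have := twiceLoopA_eq (d - s).toNat 0
  rw [hcast] at this
  simp only [zero_add] at this
  rw [this]
  rcases abs_cases (2 * s - d) with ⟨h1, h2⟩ | ⟨h1, h2⟩ <;> (rw [h1]; split <;> omega)
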